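-- pv_equiv track=rewrite | github.com/strctlybusines1/projection | Code/contest_analysis.py | stack_sizes_for_lineup
-- ===== SOURCE A (Python) =====
-- from typing import List, Tuple, Optional, Dict
--
-- def stack_sizes_for_lineup(
--     lineup: List[Tuple[str, str]],
--     name_to_team: Optional[Dict[str, str]],
-- ) -> Tuple[Optional[int], Optional[int], Optional[int]]:
--     """
--     For one lineup: (primary_stack_size, secondary_stack_size, n_teams).
--     primary = max players from one team, secondary = second-most.
--     """
--     if not name_to_team or not lineup:
--         return None, None, None
--     from collections import Counter
--     teams = []
--     for _, name in lineup:
--         team = name_to_team.get(name) or name_to_team.get(name.strip())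
--         if team:
--             teams.append(team)
--     if not teams:
--         return None, None, None
--     counts = Counter(teams).most_common()
--     primary = counts[0][1] if counts else 0
--     secondary = counts[1][1] if len(counts) > 1 else 0
--     n_teams = len(counts)
--     return primary, secondary, n_teams
-- ===== SOURCE B (Python) =====
-- from typing import List, Tuple, Optional, Dict
--
-- def stack_sizes_for_lineup(
--     lineup: List[Tuple[str, str]],
--     name_to_team: Optional[Dict[str, str]],
-- ) -> Tuple[Optional[int], Optional[int], Optional[int]]:
--     """One pass tally into a plain dict, then a single linear scan keeping the
--     two largest counts (ties allowed, so secondary may equal primary)."""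
--     if not name_to_team or not lineup:
--         return None, None, None
--     counts: Dict[str, int] = {}
--     for _, name in lineup:
--         team = name_to_team.get(name) or name_to_team.get(name.strip())
--         if team:
--             counts[team] = counts.get(team, 0) + 1
--     if not counts:
--         return None, None, None
--     max1 = max2 = 0
--     for v in counts.values():
--         if v > max1:
--             max1, max2 = v, max1
--         elif v > max2:
--             max2 = v
--     return max1, max2, len(counts)
-- ===== Notes on version B (the rewrite author's own statement) =====
-- stated objective: simpler
-- what changed: Replaces Counter().most_common() (a full sort of the tally) and positional indexing with a plain dict tally and a single linear scan that maintains the two largest counts; n_teams is len of the tally.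
import Mathlib
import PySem

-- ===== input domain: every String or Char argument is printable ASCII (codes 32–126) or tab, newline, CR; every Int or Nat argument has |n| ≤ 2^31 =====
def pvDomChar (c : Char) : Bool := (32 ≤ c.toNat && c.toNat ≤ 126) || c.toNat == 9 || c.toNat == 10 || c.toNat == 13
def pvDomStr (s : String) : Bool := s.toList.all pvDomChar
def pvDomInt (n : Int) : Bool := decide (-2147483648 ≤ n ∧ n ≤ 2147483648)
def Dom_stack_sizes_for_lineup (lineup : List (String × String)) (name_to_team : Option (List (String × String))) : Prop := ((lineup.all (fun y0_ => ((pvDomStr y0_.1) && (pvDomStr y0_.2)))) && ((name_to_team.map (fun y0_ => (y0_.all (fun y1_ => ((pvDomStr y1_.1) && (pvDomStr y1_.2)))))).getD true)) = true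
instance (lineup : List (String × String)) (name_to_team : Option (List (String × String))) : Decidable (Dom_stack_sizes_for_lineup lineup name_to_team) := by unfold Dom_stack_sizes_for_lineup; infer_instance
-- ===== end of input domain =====

-- B replaces Counter(...).most_common() (sort + positional indexing) by a plain dict tally
-- and one linear scan keeping the two largest counts; same return value everywhere (simpler).

-- the shared Python line `team = name_to_team.get(name) or name_to_team.get(name.strip())`
-- followed by the truthiness test `if team:` ('' and None are falsy); identical in A and B
def pvLookupTeam (d : List (String × String)) (name : String) : Option String :=
  let t : Option String :=
    match List.lookup name d with
    | some s => if s = "" then List.lookup (PySem.Str.strip name) d else some s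
    | none => List.lookup (PySem.Str.strip name) d
  match t with
  | some s => if s = "" then none else some s
  | none => none

-- ===== PORT A =====
def stack_sizes_for_lineup (lineup : List (String × String)) (name_to_team : Option (List (String × String))) : Option Int × Option Int × Option Int :=
  match name_to_team with
  | none => (none, none, none)                                   -- `not name_to_team` (None)
  | some d =>
    if d = [] ∨ lineup = [] then (none, none, none)              -- `not name_to_team or not lineup`
    else
      let teams := lineup.foldl (fun ts p =>
        match pvLookupTeam d p.2 with
        | some t => ts ++ [t]
        | none => ts) ([] : List String)
      if teams = [] then (none, none, none)
      else
        -- Counter(teams).most_common() = items sorted by count, descending, stable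
        let counts := PySem.List.sorted (PySem.Dict.counter teams).items (fun p => p.2) true
        let primary : Int := if counts = [] then
            0
          else match PySem.List.pyGet? counts 0 with
            | some p => p.2
            | none => 0                                           -- unreachable (counts ≠ [])
        let secondary : Int := if 1 < counts.length then
            match PySem.List.pyGet? counts 1 with
            | some p => p.2
            | none => 0                                           -- unreachable (1 < len)
          else 0
        (some primary, some secondary, some (counts.length : Int))

-- ===== PORT B =====
def stack_sizes_for_lineup_alt (lineup : List (String × String)) (name_to_team : Option (List (String × String))) : Option Int × Option Int × Option Int :=
  match name_to_team with
  | none => (none, none, none)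
  | some d =>
    if d = [] ∨ lineup = [] then (none, none, none)
    else
      let counts := lineup.foldl (fun cd p =>
        match pvLookupTeam d p.2 with
        | some t => cd.insert t (cd.getD t 0 + 1)
        | none => cd) (PySem.Dict.empty : PySem.Dict String Int)
      if counts.items = [] then (none, none, none)
      else
        let m := counts.values.foldl (fun (mm : Int × Int) v =>
          if mm.1 < v then (v, mm.1) else if mm.2 < v then (mm.1, v) else mm) ((0 : Int), (0 : Int))
        (some m.1, some m.2, some (counts.size : Int))

-- ===== PRECONDITION & SPEC =====
def Spec_stack_sizes_for_lineup (lineup : List (String × String)) (name_to_team : Option (List (String × String))) (out : Option Int × Option Int × Option Int) : Prop := out = stack_sizes_for_lineup_alt lineup name_to_team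
instance (lineup : List (String × String)) (name_to_team : Option (List (String × String))) (out : Option Int × Option Int × Option Int) : Decidable (Spec_stack_sizes_for_lineup lineup name_to_team out) := by unfold Spec_stack_sizes_for_lineup; infer_instance

-- ===== CLAIM (what is proved, stated in full; the proofs are below) =====
def Claim_equal_stack_sizes_for_lineup : Prop := ∀ (lineup : List (String × String)) (name_to_team : Option (List (String × String))), Dom_stack_sizes_for_lineup lineup name_to_team → Spec_stack_sizes_for_lineup lineup name_to_team (stack_sizes_for_lineup lineup name_to_team)

-- ===== LEMMAS AND PROOFS =====

-- the top-2 scan step of B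
def pvStep (mm : Int × Int) (v : Int) : Int × Int :=
  if mm.1 < v then (v, mm.1) else if mm.2 < v then (mm.1, v) else mm

theorem pvStep_comm (m : Int × Int) (x y : Int) : pvStep (pvStep m x) y = pvStep (pvStep m y) x := by
  obtain ⟨a, b⟩ := m
  simp only [pvStep]
  split_ifs <;> simp_all <;> omega

-- A's team-collecting loop is filterMap
theorem pvTeams_eq (d : List (String × String)) (l : List (String × String)) (acc : List String) :
    l.foldl (fun ts p => match pvLookupTeam d p.2 with | some t => ts ++ [t] | none => ts) acc
      = acc ++ l.filterMap (fun p => pvLookupTeam d p.2) := by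
  induction l generalizing acc with
  | nil => simp
  | cons p l ih =>
    simp only [List.foldl_cons, List.filterMap_cons]
    cases pvLookupTeam d p.2 <;> simp [ih]

-- B's tally loop is the insert-fold over the same filtered team sequence
theorem pvCounts_eq (d : List (String × String)) (l : List (String × String)) (cd : PySem.Dict String Int) :
    l.foldl (fun cd p => match pvLookupTeam d p.2 with | some t => cd.insert t (cd.getD t 0 + 1) | none => cd) cd
      = (l.filterMap (fun p => pvLookupTeam d p.2)).foldl (fun cd t => cd.insert t (cd.getD t 0 + 1)) cd := by
  induction l generalizing cd with
  | nil => simp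
  | cons p l ih =>
    simp only [List.foldl_cons, List.filterMap_cons]
    cases pvLookupTeam d p.2 <;> simp [ih]

theorem pvCounter_items_ne_nil {ts : List String} (h : ts ≠ []) :
    (PySem.Dict.counter ts).items ≠ [] := by
  obtain ⟨t, ts', rfl⟩ := List.exists_cons_of_ne_nil h
  have ht : t ∈ (PySem.Dict.counter (t :: ts')).keys := by
    rw [PySem.Dict.keys_counter]
    exact (PySem.Set.mem_ofList _ _).mpr (List.mem_cons_self ..)
  intro hnil
  simp only [PySem.Dict.keys, hnil, List.map_nil, List.not_mem_nil] at ht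

-- once both running maxima dominate the rest of the list, the scan is constant
theorem pvScan_const (l : List Int) (m1 m2 : Int) (h2 : ∀ x ∈ l, x ≤ m2) (h12 : m2 ≤ m1) :
    l.foldl pvStep (m1, m2) = (m1, m2) := by
  induction l with
  | nil => rfl
  | cons v l ih =>
    have hv := h2 v (List.mem_cons_self ..)
    simp only [List.foldl_cons, pvStep]
    rw [if_neg (by omega), if_neg (by omega)]
    exact ih (fun x hx => h2 x (List.mem_cons_of_mem _ hx))

-- on a non-increasing list of positive values the scan returns the first two elements
theorem pvScan_sorted (a : Int) (rest : List Int)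
    (hpw : (a :: rest).Pairwise (fun x y => y ≤ x)) (hpos : ∀ x ∈ a :: rest, 1 ≤ x) :
    (a :: rest).foldl pvStep ((0 : Int), (0 : Int))
      = (a, match rest with | [] => 0 | b :: _ => b) := by
  have ha : 1 ≤ a := hpos a (List.mem_cons_self ..)
  have h1 : pvStep (0, 0) a = (a, 0) := by simp only [pvStep]; rw [if_pos (by omega)]
  simp only [List.foldl_cons, h1]
  cases rest with
  | nil => rfl
  | cons b r =>
    have hba : b ≤ a := (List.pairwise_cons.mp hpw).1 b (List.mem_cons_self ..)
    have hb : 1 ≤ b := hpos b (List.mem_cons_of_mem _ (List.mem_cons_self ..))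
    have h2 : pvStep (a, 0) b = (a, b) := by
      simp only [pvStep]; rw [if_neg (by omega), if_pos (by omega)]
    simp only [List.foldl_cons, h2]
    have hrb : ∀ x ∈ r, x ≤ b :=
      (List.pairwise_cons.mp (List.pairwise_cons.mp hpw).2).1
    exact pvScan_const r a b hrb hba

-- every value of Counter(ts) is a positive occurrence count
theorem pvCounter_values_pos (ts : List String) :
    ∀ x ∈ (PySem.Dict.counter ts).values, 1 ≤ x := by
  intro x hx
  simp only [PySem.Dict.values, PySem.Dict.items_counter, List.map_map, List.mem_map] at hx
  obtain ⟨k, hk, rfl⟩ := hx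
  have : k ∈ ts := (PySem.Set.mem_ofList _ _).mp hk
  have := List.count_pos_iff.mpr this
  simp only [Function.comp]
  omega

-- the heart: the top-2 scan over Counter's values equals the first two entries of most_common()
theorem pvScan_main (ts : List String) (hts : ts ≠ []) :
    (PySem.Dict.counter ts).values.foldl pvStep ((0 : Int), (0 : Int))
      = (((PySem.List.sorted (PySem.Dict.counter ts).items (fun p => p.2) true).headD ("", 0)).2,
         match (PySem.List.sorted (PySem.Dict.counter ts).items (fun p => p.2) true).tail with
         | [] => 0
         | q :: _ => q.2) := by
  set s := PySem.List.sorted (PySem.Dict.counter ts).items (fun p => p.2) true with hs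
  have hperm : (s.map (fun p => p.2)).Perm (PySem.Dict.counter ts).values :=
    (PySem.List.sorted_perm _ _ _).map _
  have hfold : (PySem.Dict.counter ts).values.foldl pvStep ((0 : Int), (0 : Int))
      = (s.map (fun p => p.2)).foldl pvStep ((0 : Int), (0 : Int)) :=
    (hperm.symm.foldl_eq' (fun x _ y _ z => pvStep_comm z x y) _)
  have hpw : (s.map (fun p => p.2)).Pairwise (fun x y => y ≤ x) := by
    rw [List.pairwise_map]
    exact PySem.List.sorted_pairwise_rev _ _
  have hpos : ∀ x ∈ s.map (fun p => p.2), 1 ≤ x := by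
    intro x hx
    exact pvCounter_values_pos ts x (hperm.mem_iff.mp hx)
  have hne : s ≠ [] := by
    intro h
    rw [hs] at h
    exact pvCounter_items_ne_nil hts ((PySem.List.sorted_eq_nil_iff _ _ _).mp h)
  obtain ⟨a, rest, hcons⟩ := List.exists_cons_of_ne_nil hne
  rw [hfold, hcons]
  simp only [List.map_cons]
  rw [pvScan_sorted a.2 (rest.map (fun p => p.2))
    (by rw [← List.map_cons, ← hcons]; exact hpw)
    (by rw [← List.map_cons, ← hcons]; exact hpos)]
  cases rest <;> simp

-- ===== VERDICT (by name: the statement is the Claim_ definition above) =====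
theorem stack_sizes_for_lineup_spec : Claim_equal_stack_sizes_for_lineup := by
  intro lineup name_to_team _
  show stack_sizes_for_lineup lineup name_to_team = stack_sizes_for_lineup_alt lineup name_to_team
  cases name_to_team with
  | none => rfl
  | some d =>
    simp only [stack_sizes_for_lineup, stack_sizes_for_lineup_alt]
    by_cases hguard : d = [] ∨ lineup = []
    · rw [if_pos hguard, if_pos hguard]
    · rw [if_neg hguard, if_neg hguard]
      rw [pvTeams_eq d lineup [], List.nil_append, pvCounts_eq d lineup _]
      set ts := lineup.filterMap (fun p => pvLookupTeam d p.2) with hts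
      rw [show ts.foldl (fun cd t => cd.insert t (cd.getD t 0 + 1)) PySem.Dict.empty
            = PySem.Dict.counter ts from PySem.Dict.foldl_insert_getD_add_one_eq_counter ts]
      have hstep : (fun (mm : Int × Int) (v : Int) =>
          if mm.1 < v then (v, mm.1) else if mm.2 < v then (mm.1, v) else mm) = pvStep := rfl
      rw [hstep]
      by_cases hempty : ts = []
      · rw [hempty]; rfl
      · rw [if_neg hempty, if_neg (pvCounter_items_ne_nil hempty)]
        set s := PySem.List.sorted (PySem.Dict.counter ts).items (fun p => p.2) true with hs
        have hne : s ≠ [] := by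
          intro h
          rw [hs] at h
          exact pvCounter_items_ne_nil hempty ((PySem.List.sorted_eq_nil_iff _ _ _).mp h)
        obtain ⟨a, rest, hcons⟩ := List.exists_cons_of_ne_nil hne
        have hmain := pvScan_main ts hempty
        rw [← hs, hcons] at hmain
        rw [hcons]
        rw [hmain]
        have hlen : ((a :: rest).length : Int) = ((PySem.Dict.counter ts).size : Int) := by
          have := PySem.List.length_sorted (PySem.Dict.counter ts).items (fun p => p.2) true
          rw [← hs, hcons] at this
          simp only [PySem.Dict.size, this]
        cases rest with
        | nil =>
          rw [if_neg (show ¬([a] : List (String × Int)) = [] by simp)]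
          rw [if_neg (show ¬1 < ([a] : List (String × Int)).length by simp)]
          rw [PySem.List.pyGet?_zero_cons, ← hlen]
          rfl
        | cons b r =>
          rw [if_neg (show ¬(a :: b :: r : List (String × Int)) = [] by simp)]
          rw [if_pos (show 1 < (a :: b :: r : List (String × Int)).length by simp)]
          rw [PySem.List.pyGet?_zero_cons]
          have hg1 : PySem.List.pyGet? (a :: b :: r) 1 = some b :=
            PySem.List.pyGet?_ofNat (a :: b :: r) 1 (by simp)
          rw [hg1, ← hlen]
          rfl
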